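-- pv_equiv track=rewrite | github.com/Tixul/NGPC-craft | midi_to_ngpc/midi_to_ngpc.py | _limit_density
-- ===== SOURCE A (Python) =====
-- from collections import defaultdict
--
-- def _density_score(ev: dict, channel_bias: int, bass_bias: int) -> int:
--     # Prefer longer notes, then velocity, then lower channel numbers and lower pitches.
--     pitch_bonus = bass_bias * (127 - ev["note"])
--     return (ev["duration_frame"] * 2) + ev["velocity"] + channel_bias * (15 - ev["channel"]) + pitch_bonus
--
-- def _limit_density(
--     events: list[dict],
--     limit: int,
--     channel_bias: int,
--     bass_bias: int,
-- ) -> tuple[list[dict], int]: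
--     if limit <= 0:
--         return events, 0
--     by_start: dict[int, list[dict]] = defaultdict(list)
--     for ev in events:
--         by_start[ev["start_frame"]].append(ev)
--     kept: list[dict] = []
--     dropped = 0
--     for start in sorted(by_start.keys()):
--         group = by_start[start]
--         if len(group) <= limit:
--             kept.extend(group)
--             continue
--         group_sorted = sorted(
--             group, key=lambda e: _density_score(e, channel_bias, bass_bias), reverse=True
--         )
--         kept.extend(group_sorted[:limit])
--         dropped += len(group_sorted) - limit
--     kept.sort(key=lambda e: (e["start_frame"], e["channel"], e["note"]))
--     return kept, dropped
-- ===== SOURCE B (Python) =====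
-- def _limit_density(events, limit, channel_bias, bass_bias):
--     if limit <= 0:
--         return events, 0
--
--     def score(ev):
--         return (2 * ev["duration_frame"] + ev["velocity"]
--                 + channel_bias * (15 - ev["channel"])
--                 + bass_bias * (127 - ev["note"]))
--
--     kept = []
--     taken = {}
--     for ev in sorted(events, key=lambda e: (e["start_frame"], -score(e))):
--         start = ev["start_frame"]
--         n = taken.get(start, 0)
--         if n < limit:
--             taken[start] = n + 1
--             kept.append(ev)
--     dropped = len(events) - len(kept)
--     kept.sort(key=lambda e: (e["start_frame"], e["channel"], e["note"]))
--     return kept, dropped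
-- ===== Notes on version B (the rewrite author's own statement) =====
-- stated objective: alternative
-- what changed: Replaced the defaultdict grouping plus per-group descending sort and slicing with one global stable sort by (start_frame, -density_score) followed by a single counting pass that keeps at most `limit` events per start (dropped = len(events) - len(kept)); Pre_ excludes inputs where an event lacks one of the five fields (B scores every event once, so it raises where A only reads velocity/duration inside over-limit groups) and inputs with two events sharing (start_frame, channel, note), where the final stable sort's tie order is an accident of each implementation's pre-sort order.
import Mathlib
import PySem

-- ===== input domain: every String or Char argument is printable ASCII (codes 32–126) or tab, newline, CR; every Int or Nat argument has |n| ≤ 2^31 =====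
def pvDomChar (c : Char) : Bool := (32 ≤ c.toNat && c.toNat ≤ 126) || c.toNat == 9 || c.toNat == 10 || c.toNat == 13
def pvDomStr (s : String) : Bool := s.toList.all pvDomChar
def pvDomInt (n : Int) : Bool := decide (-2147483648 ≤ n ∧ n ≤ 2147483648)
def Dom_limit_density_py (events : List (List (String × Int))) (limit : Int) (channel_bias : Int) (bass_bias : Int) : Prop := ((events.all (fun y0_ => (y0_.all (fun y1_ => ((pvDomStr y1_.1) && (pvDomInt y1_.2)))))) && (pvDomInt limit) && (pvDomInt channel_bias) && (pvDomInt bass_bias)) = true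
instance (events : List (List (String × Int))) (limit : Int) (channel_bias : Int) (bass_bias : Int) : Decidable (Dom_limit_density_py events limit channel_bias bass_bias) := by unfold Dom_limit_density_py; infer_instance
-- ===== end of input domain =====

-- B replaces A's defaultdict grouping + per-group descending sort/slice by ONE global stable sort
-- by (start_frame, -density_score) followed by a counting pass (objective: alternative).

-- ev[k] : first-match lookup in the event dict (Pre_ guarantees the key is present where the Pythons read it)
def evGet (ev : List (String × Int)) (k : String) : Int := (PySem.Dict.mk ev).getD k 0

-- ===== PORT A =====
def density_score_py (ev : List (String × Int)) (channel_bias : Int) (bass_bias : Int) : Int :=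
  let pitch_bonus := bass_bias * (127 - evGet ev "note")
  (evGet ev "duration_frame") * 2 + evGet ev "velocity" + channel_bias * (15 - evGet ev "channel") + pitch_bonus

-- key of the final kept.sort in both Pythons: the tuple (start_frame, channel, note)
def keyA (e : List (String × Int)) : Lex (Int × Lex (Int × Int)) :=
  toLex (evGet e "start_frame", toLex (evGet e "channel", evGet e "note"))

def limit_density_py (events : List (List (String × Int))) (limit : Int) (channel_bias : Int) (bass_bias : Int) : (List (List (String × Int))) × Int :=
  if limit ≤ 0 then (events, 0) else
  let by_start : PySem.Dict Int (List (List (String × Int))) :=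
    events.foldl (fun d ev => d.modify (evGet ev "start_frame") [] (fun g => g ++ [ev])) PySem.Dict.empty
  let acc : (List (List (String × Int))) × Int :=
    (PySem.List.sorted by_start.keys (fun s => s) false).foldl
      (fun acc start =>
        let group := by_start.getD start []
        if (group.length : Int) ≤ limit then (acc.1 ++ group, acc.2) else
        let group_sorted := PySem.List.sorted group (fun e => density_score_py e channel_bias bass_bias) true
        (acc.1 ++ PySem.List.slice group_sorted none (some limit), acc.2 + ((group_sorted.length : Int) - limit)))
      ([], 0)
  (PySem.List.sorted acc.1 keyA false, acc.2)

-- ===== PORT B =====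
def score_alt (channel_bias : Int) (bass_bias : Int) (ev : List (String × Int)) : Int :=
  2 * evGet ev "duration_frame" + evGet ev "velocity" + channel_bias * (15 - evGet ev "channel") + bass_bias * (127 - evGet ev "note")

-- the body of B's single counting pass
def bStep (limit : Int) (acc : (List (List (String × Int))) × PySem.Dict Int Int) (ev : List (String × Int)) : (List (List (String × Int))) × PySem.Dict Int Int :=
  let start := evGet ev "start_frame"
  let n := acc.2.getD start 0
  if n < limit then (acc.1 ++ [ev], acc.2.insert start (n + 1)) else acc

def limit_density_py_alt (events : List (List (String × Int))) (limit : Int) (channel_bias : Int) (bass_bias : Int) : (List (List (String × Int))) × Int :=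
  if limit ≤ 0 then (events, 0) else
  let st :=
    (PySem.List.sorted events (fun e => toLex (evGet e "start_frame", -(score_alt channel_bias bass_bias e))) false).foldl
      (bStep limit) ([], PySem.Dict.empty)
  (PySem.List.sorted st.1 keyA false, (events.length : Int) - (st.1.length : Int))

-- ===== PRECONDITION & SPEC =====
def key3 (e : List (String × Int)) : Int × Int × Int :=
  (evGet e "start_frame", evGet e "channel", evGet e "note")

-- Pre_ excludes (when limit > 0): events missing one of the five fields — there Python A raises
-- KeyError, or returns while B (which scores every event once) raises KeyError — and events lists in
-- which two events share the (start_frame, channel, note) triple, where the final stable sort's tie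
-- order is an accident of each implementation's pre-sort order.
def Pre_limit_density_py (events : List (List (String × Int))) (limit : Int) (channel_bias : Int) (bass_bias : Int) : Prop :=
  limit ≤ 0 ∨
  ((∀ ev ∈ events,
      (PySem.Dict.mk ev).contains "start_frame" = true ∧ (PySem.Dict.mk ev).contains "channel" = true ∧
      (PySem.Dict.mk ev).contains "note" = true ∧ (PySem.Dict.mk ev).contains "velocity" = true ∧
      (PySem.Dict.mk ev).contains "duration_frame" = true) ∧
   (events.map key3).Nodup)
instance (events : List (List (String × Int))) (limit : Int) (channel_bias : Int) (bass_bias : Int) : Decidable (Pre_limit_density_py events limit channel_bias bass_bias) := by unfold Pre_limit_density_py; infer_instance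

def pvWitness_limit_density_py : (List (List (String × Int))) × Int × Int × Int :=
  ([[("start_frame", 0), ("channel", 1), ("note", 60), ("velocity", 90), ("duration_frame", 4)],
    [("start_frame", 0), ("channel", 2), ("note", 62), ("velocity", 80), ("duration_frame", 2)]], 1, 1, 1)

def Spec_limit_density_py (events : List (List (String × Int))) (limit : Int) (channel_bias : Int) (bass_bias : Int) (out : (List (List (String × Int))) × Int) : Prop := out = limit_density_py_alt events limit channel_bias bass_bias
instance (events : List (List (String × Int))) (limit : Int) (channel_bias : Int) (bass_bias : Int) (out : (List (List (String × Int))) × Int) : Decidable (Spec_limit_density_py events limit channel_bias bass_bias out) := by unfold Spec_limit_density_py; infer_instance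

-- ===== CLAIM (what is proved, stated in full; the proofs are below) =====
def Claim_equal_limit_density_py : Prop := ∀ (events : List (List (String × Int))) (limit : Int) (channel_bias : Int) (bass_bias : Int), Dom_limit_density_py events limit channel_bias bass_bias → Pre_limit_density_py events limit channel_bias bass_bias → Spec_limit_density_py events limit channel_bias bass_bias (limit_density_py events limit channel_bias bass_bias)

-- ===== LEMMAS AND PROOFS =====

-- ---------- proof-side abbreviations ----------
def pvSev (ev : List (String × Int)) : Int := evGet ev "start_frame"

def pvGrp (E : List (List (String × Int))) (s : Int) : List (List (String × Int)) :=
  E.filter (fun e => pvSev e == s)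

def pvGdec (E : List (List (String × Int))) (s : Int) : List (Int × List (String × Int)) :=
  (PySem.List.enumerate E 0).filter (fun p => pvSev p.2 == s)

def pvKey2 (cb bb : Int) (p : Int × List (String × Int)) : Lex (Int × Int) :=
  toLex (-(density_score_py p.2 cb bb), p.1)

def pvSdg (E : List (List (String × Int))) (cb bb : Int) (s : Int) : List (Int × List (String × Int)) :=
  PySem.List.sorted (pvGdec E s) (pvKey2 cb bb) false

def pvStarts (E : List (List (String × Int))) : List Int :=
  PySem.List.sorted (PySem.Set.ofList (E.map (fun e => pvSev e))) (fun s => s) false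

-- A's per-start density sort
def pvGs (E : List (List (String × Int))) (cb bb : Int) (s : Int) : List (List (String × Int)) :=
  PySem.List.sorted (pvGrp E s) (fun e => density_score_py e cb bb) true

-- the block A keeps for start s
def pvBlockA (E : List (List (String × Int))) (cb bb L : Int) (s : Int) : List (List (String × Int)) :=
  if ((pvGrp E s).length : Int) ≤ L then pvGrp E s else (pvGs E cb bb s).take L.toNat

def pvDA (E : List (List (String × Int))) (L : Int) (s : Int) : Int :=
  if ((pvGrp E s).length : Int) ≤ L then 0 else ((pvGrp E s).length : Int) - L

-- B's kept list (before the final sort)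
def pvKeptB (E : List (List (String × Int))) (cb bb L : Int) : List (List (String × Int)) :=
  (pvStarts E).flatMap (fun s => (pvGs E cb bb s).take L.toNat)

-- the decorated global-sort key: ((start, -score), original index)
def pvKdec (cb bb : Int) (p : Int × List (String × Int)) : Lex ((Lex (Int × Int)) × Int) :=
  toLex (toLex (pvSev p.2, -(density_score_py p.2 cb bb)), p.1)

-- ---------- generic insertion-sort lemmas ----------
theorem pvInsertBy_cons {a : Type} (b : a -> a -> Bool) (x y : a) (ys : List a) :
    PySem.List.insertBy b x (y :: ys) = if b x y then x :: y :: ys else y :: PySem.List.insertBy b x ys := rfl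

theorem pvInsertBy_map {a c : Type} (b : c -> c -> Bool) (f : a -> c) (x : a) (ys : List a) :
    PySem.List.insertBy b (f x) (ys.map f) = (PySem.List.insertBy (fun u v => b (f u) (f v)) x ys).map f := by
  induction ys with
  | nil => rfl
  | cons y ys ih =>
    rw [List.map_cons, pvInsertBy_cons, pvInsertBy_cons]
    by_cases hb : b (f x) (f y) = true
    · simp [hb]
    · simp [hb, ih]

theorem pvInsertBy_congr {a : Type} (b1 b2 : a -> a -> Bool) (x : a) (ys : List a)
    (h : forall y, y ∈ ys -> b1 x y = b2 x y) :
    PySem.List.insertBy b1 x ys = PySem.List.insertBy b2 x ys := by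
  induction ys with
  | nil => rfl
  | cons y ys ih =>
    rw [pvInsertBy_cons, pvInsertBy_cons, h y (by simp)]
    by_cases hb : b2 x y = true
    · simp [hb]
    · simp only [hb]
      rw [ih (fun z hz => h z (by simp [hz]))]

-- sorted commutes with map when the key factors through the map
theorem pvSorted_map {a c k : Type} [LinearOrder k] (f : a -> c) (key : c -> k) (l : List a) :
    PySem.List.sorted (l.map f) key false = (PySem.List.sorted l (fun x => key (f x)) false).map f := by
  rw [PySem.List.sorted_eq_foldl_insertBy, PySem.List.sorted_eq_foldl_insertBy, List.foldl_map]
  have main : forall (t : List a) (acc : List a),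
      t.foldl (fun acc x => PySem.List.insertBy (fun u v => decide (key u < key v)) (f x) acc) (acc.map f)
        = (t.foldl (fun acc x => PySem.List.insertBy (fun u v => decide (key (f u) < key (f v))) x acc) acc).map f := by
    intro t
    induction t with
    | nil => intro acc; rfl
    | cons x t ih =>
      intro acc
      simp only [List.foldl_cons]
      rw [pvInsertBy_map (fun u v => decide (key u < key v)) f x acc, ih]
  simpa using main l []

-- reverse=True with an Int key is reverse=False with the negated key
theorem pvSorted_rev_neg {a : Type} (key : a -> Int) (l : List a) :
    PySem.List.sorted l key true = PySem.List.sorted l (fun x => -(key x)) false := by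
  rw [PySem.List.sorted_rev_eq_foldl_insertBy, PySem.List.sorted_eq_foldl_insertBy]
  have h : (fun (u v : a) => decide (key v < key u)) = (fun (u v : a) => decide (-(key u) < -(key v))) := by
    funext u v
    simp [neg_lt_neg_iff]
  rw [h]

-- stability: a tag that increases along ties can be folded into the key
theorem pvSorted_stab {a k : Type} [LinearOrder k] (key : a -> k) (tag : a -> Int) (l : List a)
    (h : l.Pairwise (fun x y => key x = key y -> tag x < tag y)) :
    PySem.List.sorted l key false = PySem.List.sorted l (fun x => toLex (key x, tag x)) false := by
  have main : forall (t : List a) (acc : List a),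
      (forall x, x ∈ t -> forall y, y ∈ acc -> key y = key x -> tag y < tag x) ->
      t.Pairwise (fun x y => key x = key y -> tag x < tag y) ->
      t.foldl (fun acc x => PySem.List.insertBy (fun u v => decide (key u < key v)) x acc) acc
        = t.foldl (fun acc x => PySem.List.insertBy (fun u v => decide (toLex (key u, tag u) < toLex (key v, tag v))) x acc) acc := by
    intro t
    induction t with
    | nil => intro acc _ _; rfl
    | cons x t ih =>
      intro acc hacc hp
      have hstep : PySem.List.insertBy (fun u v => decide (key u < key v)) x acc
          = PySem.List.insertBy (fun u v => decide (toLex (key u, tag u) < toLex (key v, tag v))) x acc := by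
        apply pvInsertBy_congr
        intro y hy
        have hxy := hacc x (by simp) y hy
        simp only [decide_eq_decide, Prod.Lex.lt_iff]
        constructor
        · intro h1; exact Or.inl h1
        · intro h1
          rcases h1 with h1 | ⟨h1, h2⟩
          · exact h1
          · exact absurd h2 (not_lt_of_gt (hxy h1.symm))
      simp only [List.foldl_cons, hstep]
      apply ih
      · intro z hz y hy
        rcases (PySem.List.mem_insertBy _ x y acc).mp hy with hy1 | hy2
        · subst hy1
          exact (List.pairwise_cons.mp hp).1 z hz
        · exact hacc z (by simp [hz]) y hy2
      · exact (List.pairwise_cons.mp hp).2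
  rw [PySem.List.sorted_eq_foldl_insertBy, PySem.List.sorted_eq_foldl_insertBy]
  exact main l [] (by simp) h

-- partition of a flatMap along a nodup covering list of key values
theorem pvPartition {c d : Type} (pi : c -> Int) (F : c -> List d) (ss : List Int) (l : List c)
    (hnd : ss.Nodup) (hcov : forall x, x ∈ l -> pi x ∈ ss) :
    (l.flatMap F).Perm (ss.flatMap (fun s => (l.filter (fun x => pi x == s)).flatMap F)) := by
  induction ss generalizing l with
  | nil =>
    have : l = [] := List.eq_nil_iff_forall_not_mem.mpr (fun x hx => by simpa using hcov x hx)
    simp [this]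
  | cons s ss ih =>
    have hsplit : l.Perm (l.filter (fun x => pi x == s) ++ l.filter (fun x => !(pi x == s))) :=
      (List.filter_append_perm _ l).symm
    have h1 : (l.flatMap F).Perm ((l.filter (fun x => pi x == s)).flatMap F ++ (l.filter (fun x => !(pi x == s))).flatMap F) := by
      have := hsplit.flatMap (f := F) (g := F) (fun a _ => List.Perm.refl _)
      simpa [List.flatMap_append] using this
    have hcov2 : forall x, x ∈ l.filter (fun x => !(pi x == s)) -> pi x ∈ ss := by
      intro x hx
      rcases List.mem_filter.mp hx with ⟨hxl, hxne⟩
      have := hcov x hxl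
      simp only [List.mem_cons] at this
      rcases this with h | h
      · simp [h] at hxne
      · exact h
    have h2 := ih (l.filter (fun x => !(pi x == s))) (List.Nodup.of_cons hnd) hcov2
    have hfilt : forall t, t ∈ ss -> (l.filter (fun x => !(pi x == s))).filter (fun x => pi x == t)
        = l.filter (fun x => pi x == t) := by
      intro t hts
      have hne : t ≠ s := by
        intro hts2
        subst hts2
        exact (List.nodup_cons.mp hnd).1 hts
      rw [List.filter_comm]
      apply List.filter_eq_self.mpr
      intro x hxmem
      rcases List.mem_filter.mp hxmem with ⟨_, hpt⟩
      simp only [beq_iff_eq] at hpt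
      simp [hpt, hne]
    have h3 : ss.flatMap (fun t => ((l.filter (fun x => !(pi x == s))).filter (fun x => pi x == t)).flatMap F)
        = ss.flatMap (fun t => (l.filter (fun x => pi x == t)).flatMap F) := by
      rw [List.flatMap_def, List.flatMap_def, List.map_congr_left (fun t ht => by rw [hfilt t ht])]
    refine h1.trans ?_
    rw [List.flatMap_cons]
    exact (List.Perm.refl _).append (h2.trans (by rw [h3]))

theorem pvFlatMap_single {c d : Type} (f : c -> d) (l : List c) :
    l.flatMap (fun x => [f x]) = l.map f := by
  induction l with
  | nil => rfl
  | cons x t ih => simp [ih]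

theorem pvSumSub (l : List Int) (f g : Int -> Int) :
    (l.map (fun s => f s - g s)).sum = (l.map f).sum - (l.map g).sum := by
  induction l with
  | nil => simp
  | cons x t ih => simp [ih]; ring

theorem pvSumCast (l : List Int) (f : Int -> Nat) :
    (((l.map f).sum : Nat) : Int) = (l.map (fun s => ((f s : Nat) : Int))).sum := by
  induction l with
  | nil => simp
  | cons x t ih => simp [ih]

-- ---------- dictionary facts (A's by_start) ----------
theorem pvBystart_getD (E : List (List (String × Int))) (s : Int) :
    (E.foldl (fun d ev => d.modify (evGet ev "start_frame") [] (fun g => g ++ [ev])) PySem.Dict.empty).getD s []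
      = pvGrp E s := by
  have h1 : E.foldl (fun d ev => d.modify (evGet ev "start_frame") [] (fun g => g ++ [ev])) PySem.Dict.empty
      = (E.map (fun ev => (pvSev ev, ev))).foldl (fun d p => d.modify p.1 [] (fun g => g ++ [p.2])) PySem.Dict.empty := by
    rw [List.foldl_map]
    rfl
  rw [h1, PySem.Dict.getD_foldl_modify_append, PySem.Dict.getD_empty, List.nil_append,
      List.filter_map, List.map_map]
  simp [pvGrp, Function.comp_def, pvSev]

theorem pvBystart_keys (E : List (List (String × Int))) :
    (E.foldl (fun d ev => d.modify (evGet ev "start_frame") [] (fun g => g ++ [ev])) PySem.Dict.empty).keys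
      = PySem.Set.ofList (E.map (fun e => pvSev e)) := by
  rw [PySem.Dict.keys_foldl_modify_key E (fun ev => evGet ev "start_frame") []
        (fun _ ev => fun g => g ++ [ev]) PySem.Dict.empty]
  simp [PySem.Set.update_nil_left, pvSev]

-- ---------- group/decoration facts ----------
theorem pvGdec_snd (E : List (List (String × Int))) (s : Int) :
    (pvGdec E s).map (fun p => p.2) = pvGrp E s := by
  unfold pvGdec pvGrp
  conv_rhs => rw [← PySem.List.map_snd_enumerate E 0]
  rw [List.filter_map]
  rfl

theorem pvMem_gdec_sev (E : List (List (String × Int))) (s : Int) (p : Int × List (String × Int))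
    (hp : p ∈ pvGdec E s) : pvSev p.2 = s := by
  rcases List.mem_filter.mp hp with ⟨_, h⟩
  simpa using h

theorem pvGdec_pairwise_fst (E : List (List (String × Int))) (s : Int) :
    (pvGdec E s).Pairwise (fun p q => p.1 < q.1) := by
  exact List.Pairwise.sublist List.filter_sublist (PySem.List.pairwise_lt_enumerate E 0)

theorem pvSdg_pairwise_lt (E : List (List (String × Int))) (cb bb : Int) (s : Int) :
    (pvSdg E cb bb s).Pairwise (fun p q => pvKey2 cb bb p < pvKey2 cb bb q) := by
  have hle : (pvSdg E cb bb s).Pairwise (fun p q => pvKey2 cb bb p ≤ pvKey2 cb bb q) :=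
    PySem.List.sorted_pairwise (pvGdec E s) (pvKey2 cb bb)
  have hfst := pvGdec_pairwise_fst E s
  have hne0 : (pvGdec E s).Pairwise (fun p q => pvKey2 cb bb p ≠ pvKey2 cb bb q) := by
    refine hfst.imp ?_
    intro p q h hk
    have := congrArg (fun z => (ofLex z).2) hk
    simp [pvKey2] at this
    omega
  have hne : (pvSdg E cb bb s).Pairwise (fun p q => pvKey2 cb bb p ≠ pvKey2 cb bb q) :=
    (List.Perm.pairwise_iff (fun hxy hyx => hxy hyx.symm)
      (PySem.List.sorted_perm (pvGdec E s) (pvKey2 cb bb) false)).mpr hne0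
  exact (hle.and hne).imp (fun h => lt_of_le_of_ne h.1 h.2)

theorem pvMem_sdg_sev (E : List (List (String × Int))) (cb bb : Int) (s : Int)
    (p : Int × List (String × Int)) (hp : p ∈ pvSdg E cb bb s) : pvSev p.2 = s :=
  pvMem_gdec_sev E s p ((PySem.List.mem_sorted _ _ _ _).mp hp)

theorem pvGs_length (E : List (List (String × Int))) (cb bb : Int) (s : Int) :
    (pvGs E cb bb s).length = (pvGrp E s).length := by
  unfold pvGs
  rw [PySem.List.length_sorted]

theorem pvMem_gs_sev (E : List (List (String × Int))) (cb bb : Int) (s : Int)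
    (e : List (String × Int)) (he : e ∈ pvGs E cb bb s) : pvSev e = s := by
  have := (PySem.List.mem_sorted _ _ _ _).mp he
  rcases List.mem_filter.mp this with ⟨_, h⟩
  simpa using h

theorem pvScore_eq (cb bb : Int) (ev : List (String × Int)) :
    score_alt cb bb ev = density_score_py ev cb bb := by
  unfold score_alt density_score_py
  ring

-- the descending density sort of a group is the projection of the decorated sort
theorem pvDesc_eq (E : List (List (String × Int))) (cb bb : Int) (s : Int) :
    pvGs E cb bb s = (pvSdg E cb bb s).map (fun p => p.2) := by
  have hpair : (pvGdec E s).Pairwise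
      (fun p q => -(density_score_py p.2 cb bb) = -(density_score_py q.2 cb bb) -> p.1 < q.1) := by
    refine (pvGdec_pairwise_fst E s).imp ?_
    intro p q h _
    exact h
  unfold pvGs
  rw [← pvGdec_snd E s, pvSorted_rev_neg, pvSorted_map]
  have hstab := pvSorted_stab (fun p : Int × List (String × Int) => -(density_score_py p.2 cb bb))
    (fun p => p.1) (pvGdec E s) hpair
  exact congrArg (List.map (fun p : Int × List (String × Int) => p.2))
    (hstab.trans (show PySem.List.sorted (pvGdec E s)
        (fun x : Int × List (String × Int) => toLex (-(density_score_py x.2 cb bb), x.1)) false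
      = pvSdg E cb bb s from rfl))

theorem pvStarts_nodup (E : List (List (String × Int))) : (pvStarts E).Nodup :=
  (PySem.List.sorted_perm _ _ _).nodup_iff.mpr (PySem.Set.nodup_ofList _)

theorem pvStarts_cov (E : List (List (String × Int))) (p : Int × List (String × Int))
    (hp : p ∈ PySem.List.enumerate E 0) : pvSev p.2 ∈ pvStarts E := by
  rcases (PySem.List.mem_enumerate_iff E 0 p).mp hp with ⟨k, hk, hpk⟩
  have hmem : p.2 ∈ E := by
    rw [hpk]
    exact List.getElem_mem hk
  unfold pvStarts
  rw [PySem.List.mem_sorted, PySem.Set.mem_ofList]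
  exact List.mem_map_of_mem hmem

theorem pvStarts_cov' (E : List (List (String × Int))) (e : List (String × Int))
    (he : e ∈ E) : pvSev e ∈ pvStarts E := by
  unfold pvStarts
  rw [PySem.List.mem_sorted, PySem.Set.mem_ofList]
  exact List.mem_map_of_mem he

-- ---------- pvKdec order facts ----------
theorem pvKdec_lt_of_sev_lt (cb bb : Int) (p q : Int × List (String × Int))
    (h : pvSev p.2 < pvSev q.2) : pvKdec cb bb p < pvKdec cb bb q := by
  unfold pvKdec
  simp only [Prod.Lex.lt_iff, ofLex_toLex, toLex_inj, Prod.mk.injEq]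
  omega

theorem pvKdec_lt_of_key2 (cb bb : Int) (s : Int) (p q : Int × List (String × Int))
    (hp : pvSev p.2 = s) (hq : pvSev q.2 = s) (h : pvKey2 cb bb p < pvKey2 cb bb q) :
    pvKdec cb bb p < pvKdec cb bb q := by
  unfold pvKdec
  unfold pvKey2 at h
  rw [Prod.Lex.lt_iff] at h
  simp only [ofLex_toLex] at h
  simp only [Prod.Lex.lt_iff, ofLex_toLex, toLex_inj, Prod.mk.injEq]
  rw [hp, hq]
  omega

-- ---------- A's fold ----------
theorem pvAfold (E : List (List (String × Int))) (cb bb L : Int) (hL : 0 < L)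
    (d : PySem.Dict Int (List (List (String × Int))))
    (hd : forall s, d.getD s [] = pvGrp E s) :
    forall (ss : List Int) (acc : (List (List (String × Int))) × Int),
    ss.foldl (fun acc start =>
        let group := d.getD start []
        if (group.length : Int) ≤ L then (acc.1 ++ group, acc.2) else
        let group_sorted := PySem.List.sorted group (fun e => density_score_py e cb bb) true
        (acc.1 ++ PySem.List.slice group_sorted none (some L), acc.2 + ((group_sorted.length : Int) - L))) acc
      = (acc.1 ++ ss.flatMap (fun s => pvBlockA E cb bb L s), acc.2 + (ss.map (pvDA E L)).sum) := by
  intro ss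
  induction ss with
  | nil => intro acc; simp
  | cons s ss ih =>
    intro acc
    rw [List.foldl_cons]
    show (ss.foldl _ (let group := d.getD s []
        if (group.length : Int) ≤ L then (acc.1 ++ group, acc.2) else
        let group_sorted := PySem.List.sorted group (fun e => density_score_py e cb bb) true
        (acc.1 ++ PySem.List.slice group_sorted none (some L), acc.2 + ((group_sorted.length : Int) - L)))) = _
    simp only [hd s]
    by_cases hsmall : ((pvGrp E s).length : Int) ≤ L
    · rw [if_pos hsmall, ih]
      rw [List.flatMap_cons, List.map_cons, List.sum_cons]
      have hka : pvBlockA E cb bb L s = pvGrp E s := by unfold pvBlockA; rw [if_pos hsmall]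
      have hda : pvDA E L s = 0 := by unfold pvDA; rw [if_pos hsmall]
      rw [hka, hda]
      simp [List.append_assoc]
    · rw [if_neg hsmall, ih]
      rw [List.flatMap_cons, List.map_cons, List.sum_cons]
      have hka : pvBlockA E cb bb L s = (pvGs E cb bb s).take L.toNat := by unfold pvBlockA; rw [if_neg hsmall]
      have hda : pvDA E L s = ((pvGrp E s).length : Int) - L := by unfold pvDA; rw [if_neg hsmall]
      rw [hka, hda, PySem.List.slice_to _ (le_of_lt hL), PySem.List.length_sorted]
      unfold pvGs
      simp [List.append_assoc]
      ring

theorem pvA_eq (E : List (List (String × Int))) (L cb bb : Int) (hL : 0 < L) :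
    limit_density_py E L cb bb
      = (PySem.List.sorted ((pvStarts E).flatMap (fun s => pvBlockA E cb bb L s)) keyA false,
         ((pvStarts E).map (pvDA E L)).sum) := by
  simp only [limit_density_py]
  rw [if_neg (not_le.mpr hL)]
  rw [pvBystart_keys E]
  rw [pvAfold E cb bb L hL _ (pvBystart_getD E) _ ([], 0)]
  simp [pvStarts]

-- ---------- B's global sort decomposes into per-start density sorts ----------
theorem pvOrdered_eq (E : List (List (String × Int))) (cb bb : Int) :
    PySem.List.sorted E (fun e => toLex (evGet e "start_frame", -(score_alt cb bb e))) false
      = (pvStarts E).flatMap (fun s => pvGs E cb bb s) := by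
  have hkey : (fun e => toLex (evGet e "start_frame", -(score_alt cb bb e)))
      = (fun e : List (String × Int) => toLex (pvSev e, -(density_score_py e cb bb))) := by
    funext e
    rw [pvScore_eq]
    rfl
  rw [hkey]
  -- decorate with the original index
  have h1 : PySem.List.sorted E (fun e => toLex (pvSev e, -(density_score_py e cb bb))) false
      = (PySem.List.sorted (PySem.List.enumerate E 0) (pvKdec cb bb) false).map (fun p => p.2) := by
    conv_lhs => rw [← PySem.List.map_snd_enumerate E 0]
    rw [pvSorted_map]
    have hpw : (PySem.List.enumerate E 0).Pairwise
        (fun x y : Int × List (String × Int) =>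
          toLex (pvSev x.2, -(density_score_py x.2 cb bb)) = toLex (pvSev y.2, -(density_score_py y.2 cb bb)) -> x.1 < y.1) := by
      refine (PySem.List.pairwise_lt_enumerate E 0).imp ?_
      intro p q h _
      exact h
    have hstab := pvSorted_stab
      (fun p : Int × List (String × Int) => toLex (pvSev p.2, -(density_score_py p.2 cb bb)))
      (fun p => p.1) (PySem.List.enumerate E 0) hpw
    exact congrArg (List.map (fun p : Int × List (String × Int) => p.2)) hstab
  rw [h1]
  -- the decorated sort is the concatenation of the per-start decorated sorts
  have h2 : PySem.List.sorted (PySem.List.enumerate E 0) (pvKdec cb bb) false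
      = (pvStarts E).flatMap (fun s => pvSdg E cb bb s) := by
    apply PySem.List.sorted_eq_of_perm_of_pairwise_lt
    · -- permutation
      have hp0 : (PySem.List.enumerate E 0).Perm
          ((pvStarts E).flatMap (fun s => pvGdec E s)) := by
        have := pvPartition (fun p => pvSev p.2) (fun x => [x]) (pvStarts E)
          (PySem.List.enumerate E 0) (pvStarts_nodup E) (pvStarts_cov E)
        rw [pvFlatMap_single] at this
        simp only [List.map_id'] at this
        refine this.trans (List.Perm.of_eq ?_)
        have hfix : (fun s => ((PySem.List.enumerate E 0).filter (fun x => pvSev x.2 == s)).flatMap (fun x => [x]))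
            = (fun s => pvGdec E s) := by
          funext s
          rw [pvFlatMap_single]
          simp [pvGdec]
        rw [hfix]
      refine List.Perm.trans ?_ hp0.symm
      exact (List.Perm.refl (pvStarts E)).flatMap
        (fun s _ => PySem.List.sorted_perm (pvGdec E s) (pvKey2 cb bb) false)
    · -- strictly increasing decorated keys
      rw [List.pairwise_flatMap]
      constructor
      · intro s _
        refine List.Pairwise.imp_of_mem ?_ (pvSdg_pairwise_lt E cb bb s)
        intro p q hp hq h
        exact pvKdec_lt_of_key2 cb bb s p q (pvMem_sdg_sev E cb bb s p hp)
          (pvMem_sdg_sev E cb bb s q hq) h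
      · have hst : (pvStarts E).Pairwise (fun a b => a < b) :=
          PySem.List.sorted_ofList_pairwise_lt (E.map (fun e => pvSev e))
        refine hst.imp ?_
        intro s t h p hp q hq
        have hps := pvMem_sdg_sev E cb bb s p hp
        have hqt := pvMem_sdg_sev E cb bb t q hq
        exact pvKdec_lt_of_sev_lt cb bb p q (by rw [hps, hqt]; exact h)
  rw [h2, List.map_flatMap]
  have hfix2 : (fun s => (pvSdg E cb bb s).map (fun p => p.2)) = (fun s => pvGs E cb bb s) :=
    funext (fun s => (pvDesc_eq E cb bb s).symm)
  rw [hfix2]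

-- ---------- B's counting pass over a per-start block ----------
theorem pvBlockFold (L s : Int) (b : List (List (String × Int)))
    (hb : forall e, e ∈ b -> evGet e "start_frame" = s) :
    forall (kept : List (List (String × Int))) (d : PySem.Dict Int Int),
    ∃ d', b.foldl (bStep L) (kept, d) = (kept ++ b.take (L - d.getD s 0).toNat, d')
      ∧ forall t, t ≠ s -> d'.getD t 0 = d.getD t 0 := by
  induction b with
  | nil =>
    intro kept d
    exact ⟨d, by simp, fun t _ => rfl⟩
  | cons e b ih =>
    intro kept d
    have hes : evGet e "start_frame" = s := hb e (by simp)
    have hstep : bStep L (kept, d) e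
        = if d.getD s 0 < L then (kept ++ [e], d.insert s (d.getD s 0 + 1)) else (kept, d) := by
      unfold bStep
      rw [hes]
    rw [List.foldl_cons, hstep]
    by_cases hc : d.getD s 0 < L
    · rw [if_pos hc]
      obtain ⟨d', heq, hpres⟩ := ih (fun z hz => hb z (by simp [hz])) (kept ++ [e]) (d.insert s (d.getD s 0 + 1))
      refine ⟨d', ?_, ?_⟩
      · rw [heq, PySem.Dict.getD_insert_self]
        have hn : (L - d.getD s 0).toNat = (L - (d.getD s 0 + 1)).toNat + 1 := by omega
        rw [hn, List.take_succ_cons, List.append_assoc]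
        rfl
      · intro t ht
        rw [hpres t ht, PySem.Dict.getD_insert_of_ne _ _ _ ht]
    · rw [if_neg hc]
      obtain ⟨d', heq, hpres⟩ := ih (fun z hz => hb z (by simp [hz])) kept d
      refine ⟨d', ?_, hpres⟩
      rw [heq]
      have hn : (L - d.getD s 0).toNat = 0 := by omega
      rw [hn, List.take_zero, List.take_zero, List.append_nil]

-- ---------- B's counting pass over the whole start-sorted list ----------
theorem pvChainFold (L : Int) (Bk : Int -> List (List (String × Int)))
    (hBk : forall s e, e ∈ Bk s -> evGet e "start_frame" = s) :
    forall (ss : List Int), ss.Nodup ->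
    forall (kept : List (List (String × Int))) (d : PySem.Dict Int Int),
    (forall s, s ∈ ss -> d.getD s 0 = 0) ->
    ∃ d', (ss.flatMap Bk).foldl (bStep L) (kept, d)
        = (kept ++ ss.flatMap (fun s => (Bk s).take L.toNat), d')
      ∧ forall t, t ∉ ss -> d'.getD t 0 = d.getD t 0 := by
  intro ss
  induction ss with
  | nil =>
    intro _ kept d _
    exact ⟨d, by simp, fun t _ => rfl⟩
  | cons s ss ih =>
    intro hnd kept d hd
    rw [List.flatMap_cons, List.foldl_append]
    obtain ⟨d1, heq1, hpres1⟩ := pvBlockFold L s (Bk s) (fun e he => hBk s e he) kept d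
    rw [heq1, hd s (by simp), sub_zero]
    have hd1 : forall t, t ∈ ss -> d1.getD t 0 = 0 := by
      intro t ht
      have hts : t ≠ s := by
        intro h
        subst h
        exact (List.nodup_cons.mp hnd).1 ht
      rw [hpres1 t hts]
      exact hd t (by simp [ht])
    obtain ⟨d2, heq2, hpres2⟩ := ih (List.Nodup.of_cons hnd) (kept ++ (Bk s).take L.toNat) d1 hd1
    refine ⟨d2, ?_, ?_⟩
    · rw [heq2, List.flatMap_cons, List.append_assoc]
    · intro t ht
      have ht1 : t ≠ s := fun h => ht (by simp [h])
      have ht2 : t ∉ ss := fun h => ht (by simp [h])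
      rw [hpres2 t ht2, hpres1 t ht1]

theorem pvB_eq (E : List (List (String × Int))) (L cb bb : Int) (hL : 0 < L) :
    limit_density_py_alt E L cb bb
      = (PySem.List.sorted (pvKeptB E cb bb L) keyA false,
         (E.length : Int) - ((pvKeptB E cb bb L).length : Int)) := by
  simp only [limit_density_py_alt]
  rw [if_neg (not_le.mpr hL)]
  rw [pvOrdered_eq E cb bb]
  obtain ⟨d', heq, _⟩ := pvChainFold L (pvGs E cb bb) (fun s e he => pvMem_gs_sev E cb bb s e he)
    (pvStarts E) (pvStarts_nodup E) [] PySem.Dict.empty (fun s _ => PySem.Dict.getD_empty s 0)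
  rw [heq]
  rfl

-- ---------- the kept lists are permutations ----------
theorem pvKept_perm (E : List (List (String × Int))) (cb bb L : Int) (hL : 0 < L) :
    ((pvStarts E).flatMap (fun s => pvBlockA E cb bb L s)).Perm (pvKeptB E cb bb L) := by
  unfold pvKeptB
  refine (List.Perm.refl (pvStarts E)).flatMap ?_
  intro s _
  by_cases hsmall : ((pvGrp E s).length : Int) ≤ L
  · have hlen : (pvGs E cb bb s).length ≤ L.toNat := by
      rw [pvGs_length]
      omega
    rw [List.take_of_length_le hlen]
    unfold pvBlockA
    rw [if_pos hsmall]
    exact (PySem.List.sorted_perm _ _ _).symm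
  · unfold pvBlockA
    rw [if_neg hsmall]

-- ---------- distinct (start, channel, note) triples ----------
theorem pvKeyA_eq (e f : List (String × Int)) (h : keyA e = keyA f) : key3 e = key3 f := by
  unfold keyA at h
  have h1 := congrArg (fun z => (ofLex z).1) h
  have h2 := congrArg (fun z => (ofLex (ofLex z).2).1) h
  have h3 := congrArg (fun z => (ofLex (ofLex z).2).2) h
  simp only [ofLex_toLex] at h1 h2 h3
  unfold key3
  rw [h1, h2, h3]

theorem pvKeptB_pairwise (E : List (List (String × Int))) (cb bb L : Int)
    (hnd : (E.map key3).Nodup) :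
    (pvKeptB E cb bb L).Pairwise (fun x y => keyA x ≠ keyA y) := by
  have hE : E.Pairwise (fun x y => keyA x ≠ keyA y) := by
    have h0 : E.Pairwise (fun x y => key3 x ≠ key3 y) := (List.pairwise_map.mp hnd)
    exact h0.imp (fun h hk => h (pvKeyA_eq _ _ hk))
  unfold pvKeptB
  rw [List.pairwise_flatMap]
  constructor
  · intro s _
    have hgrp : (pvGrp E s).Pairwise (fun x y => keyA x ≠ keyA y) :=
      List.Pairwise.sublist List.filter_sublist hE
    have hgs : (pvGs E cb bb s).Pairwise (fun x y => keyA x ≠ keyA y) :=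
      (List.Perm.pairwise_iff (fun hxy hyx => hxy hyx.symm)
        (PySem.List.sorted_perm (pvGrp E s) _ true)).mpr hgrp
    exact List.Pairwise.sublist (List.take_sublist _ _) hgs
  · have hst : (pvStarts E).Pairwise (fun a b => a < b) :=
      PySem.List.sorted_ofList_pairwise_lt (E.map (fun e => pvSev e))
    refine hst.imp ?_
    intro s t h x hx y hy hk
    have hxs : pvSev x = s := pvMem_gs_sev E cb bb s x (List.mem_of_mem_take hx)
    have hyt : pvSev y = t := pvMem_gs_sev E cb bb t y (List.mem_of_mem_take hy)
    have h1 := congrArg (fun z => (ofLex z).1) hk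
    simp only [keyA, ofLex_toLex] at h1
    have : s = t := by
      rw [← hxs, ← hyt]
      exact h1
    omega

-- ---------- dropped counts agree ----------
theorem pvDropped_eq (E : List (List (String × Int))) (cb bb L : Int) (hL : 0 < L) :
    ((pvStarts E).map (pvDA E L)).sum
      = (E.length : Int) - ((pvKeptB E cb bb L).length : Int) := by
  have hE : (E.length : Int) = ((pvStarts E).map (fun s => ((pvGrp E s).length : Int))).sum := by
    have hperm : E.Perm ((pvStarts E).flatMap (fun s => pvGrp E s)) := by
      have := pvPartition (fun e => pvSev e) (fun x => [x]) (pvStarts E) E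
        (pvStarts_nodup E) (pvStarts_cov' E)
      rw [pvFlatMap_single] at this
      simp only [List.map_id'] at this
      refine this.trans (List.Perm.of_eq ?_)
      have hfix : (fun s => (E.filter (fun e => pvSev e == s)).flatMap (fun x => [x]))
          = (fun s => pvGrp E s) := by
        funext s
        rw [pvFlatMap_single]
        simp [pvGrp]
      rw [hfix]
    have hlen := hperm.length_eq
    rw [hlen, List.length_flatMap]
    rw [← pvSumCast]
  have hK : ((pvKeptB E cb bb L).length : Int)
      = ((pvStarts E).map (fun s => ((min L.toNat (pvGrp E s).length : Nat) : Int))).sum := by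
    unfold pvKeptB
    rw [List.length_flatMap]
    rw [← pvSumCast]
    have hfix : (fun s => ((pvGs E cb bb s).take L.toNat).length)
        = (fun s => min L.toNat (pvGrp E s).length) := by
      funext s
      rw [List.length_take, pvGs_length]
    rw [hfix]
  rw [hE, hK, ← pvSumSub]
  apply congrArg
  apply List.map_congr_left
  intro s _
  unfold pvDA
  by_cases hsmall : ((pvGrp E s).length : Int) ≤ L
  · rw [if_pos hsmall]
    omega
  · rw [if_neg hsmall]
    omega

-- ---------- final assembly ----------
theorem pvMain (E : List (List (String × Int))) (L cb bb : Int)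
    (hnd : L ≤ 0 ∨ (E.map key3).Nodup) :
    limit_density_py E L cb bb = limit_density_py_alt E L cb bb := by
  by_cases hL : L ≤ 0
  · unfold limit_density_py limit_density_py_alt
    rw [if_pos hL, if_pos hL]
  · have hL2 : 0 < L := not_le.mp hL
    have hnd2 : (E.map key3).Nodup := hnd.resolve_left hL
    rw [pvA_eq E L cb bb hL2, pvB_eq E L cb bb hL2, Prod.mk.injEq]
    refine ⟨?_, pvDropped_eq E cb bb L hL2⟩
    -- both final sorts equal the unique keyA-increasing arrangement
    have hperm : ((pvStarts E).flatMap (fun s => pvBlockA E cb bb L s)).Perm (pvKeptB E cb bb L) :=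
      pvKept_perm E cb bb L hL2
    have hSBperm : (PySem.List.sorted (pvKeptB E cb bb L) keyA false).Perm (pvKeptB E cb bb L) :=
      PySem.List.sorted_perm _ _ _
    have hle : (PySem.List.sorted (pvKeptB E cb bb L) keyA false).Pairwise (fun x y => keyA x ≤ keyA y) :=
      PySem.List.sorted_pairwise _ _
    have hne : (PySem.List.sorted (pvKeptB E cb bb L) keyA false).Pairwise (fun x y => keyA x ≠ keyA y) :=
      (List.Perm.pairwise_iff (fun hxy hyx => hxy hyx.symm) hSBperm).mpr
        (pvKeptB_pairwise E cb bb L hnd2)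
    apply PySem.List.sorted_eq_of_perm_of_pairwise_lt
    · exact hSBperm.trans hperm.symm
    · exact (hle.and hne).imp (fun h => lt_of_le_of_ne h.1 h.2)

-- ===== VERDICT (by name: the statement is the Claim_ definition above) =====
theorem limit_density_py_spec : Claim_equal_limit_density_py := by
  intro events limit channel_bias bass_bias _ hpre
  unfold Spec_limit_density_py
  unfold Pre_limit_density_py at hpre
  exact pvMain events limit channel_bias bass_bias
    (hpre.imp id (fun h => h.2))
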